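-- pv_equiv track=rewrite | github.com/kermitt/challenges | py/set_question.py | is_extreme
-- ===== SOURCE A (Python) =====
-- def is_extreme(ary):
--     # True = everything is unique OR everything is the same.
--     s = set()
--     for x in ary:
--         s.add(str(x))
--
--     n1 = len(ary)
--     n2 = len(s)
--     if n2 == 1:
--         # same!
--         return True
--     elif n1 == n2:
--         # unique
--         return True
--     else:
--         return False
-- ===== SOURCE B (Python) =====
-- def is_extreme(ary):
--     # Sort the stringified elements; duplicates become adjacent, so "all same"
--     # and "all unique" are read off the sorted order in one scan.
--     s = sorted(str(x) for x in ary)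
--     if len(s) <= 1:
--         return True
--     return s[0] == s[-1] or all(a != b for a, b in zip(s, s[1:]))
-- ===== Notes on version B (the rewrite author's own statement) =====
-- stated objective: alternative
-- what changed: Replaces the set-building pass with two length comparisons by a sort followed by one adjacent-pair scan: after sorting, 'all same' is first==last and 'all unique' is no equal adjacent pair.
import Mathlib
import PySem

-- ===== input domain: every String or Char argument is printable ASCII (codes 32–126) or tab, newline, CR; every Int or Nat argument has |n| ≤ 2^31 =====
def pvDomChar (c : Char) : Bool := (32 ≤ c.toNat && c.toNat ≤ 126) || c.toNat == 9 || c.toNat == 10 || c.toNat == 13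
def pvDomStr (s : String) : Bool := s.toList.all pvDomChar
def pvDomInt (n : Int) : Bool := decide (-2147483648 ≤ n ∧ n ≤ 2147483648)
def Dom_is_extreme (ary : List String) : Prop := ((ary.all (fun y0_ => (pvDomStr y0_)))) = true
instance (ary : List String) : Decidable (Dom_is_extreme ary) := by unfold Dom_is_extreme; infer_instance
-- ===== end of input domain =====

-- B replaces A's set-building with two size comparisons by a sort plus one adjacent-pair scan (alternative decomposition, not claimed faster).

-- ===== PORT A =====
-- s = set(); for x in ary: s.add(str(x))  -- str(x) on a string is the string itself
def is_extreme (ary : List String) : Bool :=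
  let s : PySem.Set String := ary.foldl (fun s x => PySem.Set.add s x) PySem.Set.empty
  let n1 := PySem.List.len ary
  let n2 := PySem.Set.len s
  if n2 == 1 then true
  else if n1 == n2 then true
  else false

-- ===== PORT B =====
-- s = sorted(str(x) for x in ary); str(x) on a string is the string itself.
-- s[0] / s[-1] are ported with pyGetD (exact here: that branch guarantees len(s) ≥ 2);
-- zip(s, s[1:]) is List.zip with slice.
def is_extreme_alt (ary : List String) : Bool :=
  let s := PySem.List.sorted (ary.map (fun x => x)) (fun x => x) false
  if s.length ≤ 1 then true
  else (PySem.List.pyGetD s 0 "" == PySem.List.pyGetD s (-1) "") ||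
       (s.zip (PySem.List.slice s (some 1) none)).all (fun p => p.1 != p.2)

-- ===== PRECONDITION & SPEC =====
def Spec_is_extreme (ary : List String) (out : Bool) : Prop := out = is_extreme_alt ary
instance (ary : List String) (out : Bool) : Decidable (Spec_is_extreme ary out) := by unfold Spec_is_extreme; infer_instance

-- ===== CLAIM (what is proved, stated in full; the proofs are below) =====
def Claim_equal_is_extreme : Prop := ∀ (ary : List String), Dom_is_extreme ary → Spec_is_extreme ary (is_extreme ary)

-- ===== LEMMAS AND PROOFS =====

-- A's set is Python's dedup of ary
theorem setFold_eq_dedup (ary : List String) :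
    ary.foldl (fun s x => PySem.Set.add s x) PySem.Set.empty = PySem.List.dedup ary := by
  simp [PySem.List.dedup_eq_ofList, PySem.Set.ofList_eq_foldl, PySem.Set.empty]

-- A in disjunctive normal form: |set| = 1 or |ary| = |set|
theorem is_extreme_eq_or (ary : List String) :
    is_extreme ary
      = (decide ((PySem.List.dedup ary).length = 1)
         || decide (ary.length = (PySem.List.dedup ary).length)) := by
  unfold is_extreme
  rw [show (ary.foldl (fun s x => PySem.Set.add s x) PySem.Set.empty)
        = PySem.List.dedup ary from setFold_eq_dedup ary]
  simp [PySem.Set.len, PySem.List.len]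
  by_cases h1 : (PySem.List.dedup ary).length = 1 <;>
    by_cases h2 : ary.length = (PySem.List.dedup ary).length <;>
      simp_all

-- |set(ary)| = 1  ↔  ary nonempty with all elements equal
theorem dedup_length_one_iff (ary : List String) :
    (PySem.List.dedup ary).length = 1 ↔ (ary ≠ [] ∧ ∀ u ∈ ary, ∀ v ∈ ary, u = v) := by
  constructor
  · intro h
    obtain ⟨a, ha⟩ := List.length_eq_one_iff.mp h
    have hmem : ∀ u ∈ ary, u = a := by
      intro u hu
      have : u ∈ PySem.List.dedup ary := (PySem.List.mem_dedup ary u).mpr hu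
      rw [ha] at this; simpa using this
    have hane : a ∈ ary := by
      have h' : a ∈ PySem.List.dedup ary := by rw [ha]; simp
      exact (PySem.List.mem_dedup ary a).mp h'
    refine ⟨by rintro rfl; simp at hane, ?_⟩
    intro u hu v hv; rw [hmem u hu, hmem v hv]
  · rintro ⟨hne, hall⟩
    obtain ⟨w, hw⟩ := List.exists_mem_of_ne_nil ary hne
    have hwd : w ∈ PySem.List.dedup ary := (PySem.List.mem_dedup ary w).mpr hw
    have hnd := PySem.List.nodup_dedup ary
    have hmem : ∀ u ∈ PySem.List.dedup ary, u = w := by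
      intro u hu
      exact hall u ((PySem.List.mem_dedup ary u).mp hu) w hw
    match hd : PySem.List.dedup ary with
    | [] => rw [hd] at hwd; simp at hwd
    | [a] => rfl
    | a :: b :: rest =>
      rw [hd] at hmem hnd
      have ha := hmem a (by simp)
      have hb := hmem b (by simp)
      rw [List.nodup_cons] at hnd
      exact absurd (ha.trans hb.symm) (fun h => hnd.1 (h ▸ List.mem_cons_self))

-- |set(ary)| = |ary|  ↔  ary has no duplicates
theorem dedup_length_eq_iff (ary : List String) :
    ary.length = (PySem.List.dedup ary).length ↔ ary.Nodup := by
  have hlen : (PySem.List.dedup ary).length = ary.dedup.length := by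
    have h1 : (PySem.List.dedup ary).toFinset = ary.toFinset := by
      ext a; simp
    have h2 := List.toFinset_card_of_nodup (l := PySem.List.dedup ary) (PySem.List.nodup_dedup ary)
    have h3 := List.card_toFinset ary
    rw [h1] at h2; omega
  rw [hlen]
  constructor
  · intro h
    have := (List.dedup_sublist ary).eq_of_length h.symm
    rw [← this]; exact ary.nodup_dedup
  · intro h; rw [List.dedup_eq_self.mpr h]

-- sorted order: every element lies below the last
theorem le_getLast_of_pairwise (t : List String) (h : t.Pairwise (· ≤ ·)) (hne : t ≠ []) :
    ∀ u ∈ t, u ≤ t.getLast hne := by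
  intro u hu
  obtain ⟨i, hi, rfl⟩ := List.mem_iff_getElem.mp hu
  rw [List.getLast_eq_getElem]
  rcases Nat.lt_or_ge i (t.length - 1) with hlt | hge
  · exact List.pairwise_iff_getElem.mp h i (t.length - 1) hi (by omega) hlt
  · have : i = t.length - 1 := by omega
    subst this; exact le_refl _

-- the adjacent-pair scan on a ≤-sorted list decides Nodup
theorem zip_all_ne_iff_nodup (t : List String) (h : t.Pairwise (· ≤ ·)) :
    ((t.zip (t.drop 1)).all (fun p => p.1 != p.2) = true) ↔ t.Nodup := by
  induction t with
  | nil => simp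
  | cons a l ih =>
    match l with
    | [] => simp
    | b :: l' =>
      have htail : (b :: l').Pairwise (· ≤ ·) := (List.pairwise_cons.mp h).2
      have hab : a ≤ b := (List.pairwise_cons.mp h).1 b (by simp)
      have hble : ∀ x ∈ l', b ≤ x := (List.pairwise_cons.mp htail).1
      simp only [List.drop_succ_cons, List.drop_zero, List.zip_cons_cons, List.all_cons,
        Bool.and_eq_true, bne_iff_ne, ne_eq]
      rw [show ((b :: l').zip ((b :: l').drop 1)).all (fun p => p.1 != p.2)
            = ((b :: l').zip l').all (fun p => p.1 != p.2) by simp] at ih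
      rw [ih htail]
      constructor
      · rintro ⟨hne, hnd⟩
        rw [List.nodup_cons]
        refine ⟨?_, hnd⟩
        intro hmem
        rcases List.mem_cons.mp hmem with rfl | hmem'
        · exact hne rfl
        · exact hne (le_antisymm hab (hble a hmem'))
      · intro hnd
        rw [List.nodup_cons] at hnd
        exact ⟨fun h => hnd.1 (h ▸ List.mem_cons_self), hnd.2⟩

theorem is_extreme_eq (ary : List String) : is_extreme ary = is_extreme_alt ary := by
  rw [is_extreme_eq_or]
  unfold is_extreme_alt
  rw [List.map_id']
  have hperm : (PySem.List.sorted ary (fun x => x) false).Perm ary := PySem.List.sorted_perm ..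
  have hpw : (PySem.List.sorted ary (fun x => x) false).Pairwise (· ≤ ·) :=
    PySem.List.sorted_pairwise ..
  match ht : PySem.List.sorted ary (fun x => x) false with
  | [] =>
    rw [ht] at hperm
    have hary : ary = [] := hperm.symm.eq_nil
    subst hary; decide
  | [x] =>
    rw [ht] at hperm
    have hary : ary = [x] := List.Perm.eq_singleton hperm.symm
    subst hary
    simp [PySem.List.dedup, PySem.Set.ofList, PySem.Set.add, PySem.Set.empty, PySem.Set.contains]
  | x :: y :: rest =>
    rw [ht] at hperm hpw
    set t : List String := x :: y :: rest with htdef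
    have hne : t ≠ [] := by simp [htdef]
    have hlen2 : ¬ t.length ≤ 1 := by simp [htdef]
    rw [if_neg hlen2]
    have h0 : PySem.List.pyGetD t 0 "" = x := by simp [htdef, PySem.List.pyGetD_zero_cons]
    have hm1 : PySem.List.pyGetD t (-1) "" = t.getLast hne := PySem.List.pyGetD_neg_one t "" hne
    have hslice : PySem.List.slice t (some 1) none = t.drop 1 := by simp [pysem]
    rw [h0, hm1, hslice, Bool.beq_eq_decide_eq]
    -- left disjuncts agree: |set| = 1  ↔  first = last in sorted order
    have hL : ((PySem.List.dedup ary).length = 1) ↔ (x = t.getLast hne) := by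
      constructor
      · intro h
        obtain ⟨-, hall⟩ := (dedup_length_one_iff ary).mp h
        exact hall x (hperm.mem_iff.mp (by simp [htdef]))
          (t.getLast hne) (hperm.mem_iff.mp (t.getLast_mem hne))
      · intro hxe
        rw [dedup_length_one_iff]
        have halleq : ∀ u ∈ ary, u = x := by
          intro u hu
          have hut : u ∈ t := hperm.mem_iff.mpr hu
          have h1 : x ≤ u := by
            rcases List.mem_cons.mp hut with rfl | hmem
            · exact le_refl _
            · exact (List.pairwise_cons.mp hpw).1 u hmem
          have h2 : u ≤ t.getLast hne := le_getLast_of_pairwise t hpw hne u hut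
          rw [← hxe] at h2
          exact le_antisymm h2 h1
        refine ⟨by rintro rfl; exact hne hperm.eq_nil, ?_⟩
        intro u hu v hv; rw [halleq u hu, halleq v hv]
    -- right disjuncts agree: |ary| = |set|  ↔  no equal adjacent pair in sorted order
    have hR : decide (ary.length = (PySem.List.dedup ary).length)
        = ((t.zip (t.drop 1)).all (fun p => p.1 != p.2)) := by
      rcases Decidable.em (ary.Nodup) with hnd | hnd
      · rw [decide_eq_true ((dedup_length_eq_iff ary).mpr hnd),
            (zip_all_ne_iff_nodup t hpw).mpr ((hperm.nodup_iff).mpr hnd)]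
      · rw [decide_eq_false (fun h => hnd ((dedup_length_eq_iff ary).mp h)),
            eq_comm, Bool.eq_false_iff]
        intro h
        exact hnd ((hperm.nodup_iff).mp ((zip_all_ne_iff_nodup t hpw).mp h))
    rw [decide_eq_decide.mpr hL, hR]

-- ===== VERDICT (by name: the statement is the Claim_ definition above) =====
theorem is_extreme_spec : Claim_equal_is_extreme := by
  intro ary _
  unfold Spec_is_extreme
  exact is_extreme_eq ary
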